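-- pv_equiv track=rewrite | github.com/tracy-talent/AIPolicy | pasaie/utils/corpus.py | get_entity_pos_of_relation
-- ===== SOURCE A (Python) =====
-- def get_entity_pos_of_relation(bios):
--     """get entity pair position of relation
--
--     Args:
--         bios (list[str]): bio tag sequence
--
--     Returns:
--         span1 (tuple): left entity span
--         span2 (tuple): right entity span
--     """
--     f = False
--     i = 0
--     while i < len(bios):
--         if bios[i][0] == 'B':
--             spos = i
--             while i + 1 < len(bios) and bios[i + 1][0] == 'I':
--                 i += 1
--             if not f:
--                 span1 = (spos, i + 1)
--                 f = True
--             else: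
--                 span2 = (spos, i + 1)
--         i += 1
--     return span1, span2
-- ===== SOURCE B (Python) =====
-- def get_entity_pos_of_relation(bios):
--     """Single forward pass: collect all entity spans with a state machine,
--     then return the first and the last span (A keeps overwriting span2)."""
--     spans = []
--     start = None
--     for i, tag in enumerate(bios):
--         c = tag[0]
--         if c == 'B':
--             if start is not None:
--                 spans.append((start, i))
--             start = i
--         elif c != 'I':
--             if start is not None:
--                 spans.append((start, i))
--                 start = None
--     if start is not None:
--         spans.append((start, len(bios)))
--     return spans[0], spans[-1]
-- ===== Notes on version B (the rewrite author's own statement) =====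
-- stated objective: simpler
-- what changed: Replaces A's nested while loops (inner loop that skips 'I' tags plus span1/span2 flag juggling) by a single forward pass with a start-state machine that collects the list of all entity spans and then returns its first and last element.
import Mathlib
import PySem

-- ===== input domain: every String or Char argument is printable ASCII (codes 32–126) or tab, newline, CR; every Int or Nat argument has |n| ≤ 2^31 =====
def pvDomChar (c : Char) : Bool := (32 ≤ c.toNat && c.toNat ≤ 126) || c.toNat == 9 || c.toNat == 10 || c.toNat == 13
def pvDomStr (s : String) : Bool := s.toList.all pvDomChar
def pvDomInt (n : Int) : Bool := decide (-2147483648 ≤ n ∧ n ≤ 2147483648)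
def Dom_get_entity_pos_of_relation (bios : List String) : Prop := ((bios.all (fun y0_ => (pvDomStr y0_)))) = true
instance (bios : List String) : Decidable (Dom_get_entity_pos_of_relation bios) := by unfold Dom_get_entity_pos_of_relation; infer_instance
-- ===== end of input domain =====

-- B replaces A's nested while loops by a single state-machine pass that collects all
-- entity spans and then returns the first and the last one (objective: simpler).

-- ===== PORT A =====
-- inner while loop: 'while i + 1 < len(bios) and bios[i+1][0] == "I": i += 1', returns final i
def aInner (bios : List String) (i : Nat) : Nat :=
  if h : i + 1 < bios.length then
    if PySem.Str.pyGet? bios[i+1]! 0 = some 'I' then aInner bios (i+1) else i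
  else i
termination_by bios.length - i

-- i ≤ aInner bios i (needed for aLoop's termination)
theorem aInner_ge (bios : List String) (i : Nat) : i ≤ aInner bios i := by
  fun_induction aInner bios i with
  | case1 i h hI ih => omega
  | case2 i h hI => omega
  | case3 i h => omega

-- outer while loop of A; s1/s2 carry span1/span2 (Python leaves them unbound before
-- first assignment; under Pre_ both are assigned, so the (0,0) defaults are never returned)
def aLoop (bios : List String) (i : Nat) (f : Bool) (s1 s2 : Int × Int) : (Int × Int) × (Int × Int) :=
  if h : i < bios.length then
    if PySem.Str.pyGet? bios[i]! 0 = some 'B' then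
      let j := aInner bios i
      if f = false then aLoop bios (j+1) true ((i : Int), (j : Int)+1) s2
      else aLoop bios (j+1) f s1 ((i : Int), (j : Int)+1)
    else aLoop bios (i+1) f s1 s2
  else (s1, s2)
termination_by bios.length - i
decreasing_by
  · have := aInner_ge bios i; omega
  · have := aInner_ge bios i; omega
  · omega

def get_entity_pos_of_relation (bios : List String) : (Int × Int) × (Int × Int) :=
  aLoop bios 0 false (0, 0) (0, 0)

-- ===== PORT B =====
-- one step of the for-loop body of Source B on state (spans, start) and (i, tag);
-- 'tag[0]' is PySem.Str.pyGet? tag 0 (none = IndexError, excluded by Pre_)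
def bStep (st : List (Int × Int) × Option Int) (p : Int × String) : List (Int × Int) × Option Int :=
  let c := PySem.Str.pyGet? p.2 0
  if c = some 'B' then
    ((match st.2 with | some s => st.1 ++ [(s, p.1)] | none => st.1), some p.1)
  else if c ≠ some 'I' then
    (match st.2 with | some s => (st.1 ++ [(s, p.1)], none) | none => st)
  else st

def get_entity_pos_of_relation_alt (bios : List String) : (Int × Int) × (Int × Int) :=
  let st := (PySem.List.enumerate bios 0).foldl bStep ([], none)
  let spans := match st.2 with | some s => st.1 ++ [(s, (bios.length : Int))] | none => st.1
  -- spans[0], spans[-1]: IndexError on empty spans, excluded by Pre_ (defaults never returned there)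
  ((PySem.List.pyGet? spans 0).getD (0, 0), (PySem.List.pyGet? spans (-1)).getD (0, 0))

-- ===== PRECONDITION & SPEC =====
def isB (s : String) : Bool := PySem.Str.pyGet? s 0 == some 'B'

-- Pre_ excludes exactly the inputs where Python A raises: an empty tag string
-- (IndexError on tag[0]) or fewer than two 'B' tags (span1/span2 stay unbound:
-- UnboundLocalError); on everything else A returns normally.
def Pre_get_entity_pos_of_relation (bios : List String) : Prop :=
  (∀ s ∈ bios, s ≠ "") ∧ 2 ≤ bios.countP isB
instance (bios : List String) : Decidable (Pre_get_entity_pos_of_relation bios) := by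
  unfold Pre_get_entity_pos_of_relation; infer_instance

def pvWitness_get_entity_pos_of_relation : List String := ["B", "I", "O", "B-X"]

def Spec_get_entity_pos_of_relation (bios : List String) (out : (Int × Int) × (Int × Int)) : Prop := out = get_entity_pos_of_relation_alt bios
instance (bios : List String) (out : (Int × Int) × (Int × Int)) : Decidable (Spec_get_entity_pos_of_relation bios out) := by unfold Spec_get_entity_pos_of_relation; infer_instance

-- ===== CLAIM (what is proved, stated in full; the proofs are below) =====
def Claim_equal_get_entity_pos_of_relation : Prop := ∀ (bios : List String), Dom_get_entity_pos_of_relation bios → Pre_get_entity_pos_of_relation bios → Spec_get_entity_pos_of_relation bios (get_entity_pos_of_relation bios)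
-- ===== LEMMAS AND PROOFS =====

-- index-recursion view of B's foldl over enumerate (proof helper)
def bGo (bios : List String) (i : Nat) (st : List (Int × Int) × Option Int) :
    List (Int × Int) × Option Int :=
  if h : i < bios.length then bGo bios (i+1) (bStep st ((i : Int), bios[i]!)) else st
termination_by bios.length - i

-- the final 'if start is not None' close of Source B
def bFin (bios : List String) (st : List (Int × Int) × Option Int) : List (Int × Int) :=
  match st.2 with | some s => st.1 ++ [(s, (bios.length : Int))] | none => st.1

-- the span A has virtually recorded for the currently open entity
def vtail (start : Option Int) (x : Int) : List (Int × Int) :=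
  match start with | some sp => [(sp, x)] | none => []

theorem headD_append {α : Type} (l l' : List α) (d : α) (h : l ≠ []) :
    (l ++ l').headD d = l.headD d := by
  cases l with
  | nil => exact absurd rfl h
  | cons a t => simp

theorem foldl_enum_eq_bGo (l pre : List String) :
    ∀ st, (PySem.List.enumerate l (pre.length : Int)).foldl bStep st = bGo (pre ++ l) pre.length st := by
  induction l generalizing pre with
  | nil =>
    intro st
    rw [bGo]
    simp [PySem.List.enumerate_nil]
  | cons x xs ih =>
    intro st
    rw [PySem.List.enumerate_cons, bGo]
    have hlt : pre.length < (pre ++ x :: xs).length := by simp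
    have hx : (pre ++ x :: xs)[pre.length]! = x := by
      rw [getElem!_pos (pre ++ x :: xs) pre.length hlt]
      simp
    simp only [List.foldl_cons, dif_pos hlt, hx]
    have := ih (pre ++ [x]) (bStep st ((pre.length : Int), x))
    simp only [List.length_append, List.length_cons, List.length_nil] at this ⊢
    rw [show ((pre.length : Int) + 1) = ((pre.length + 1 : Nat) : Int) by push_cast; ring]
    rw [this]
    simp

-- aInner never reaches bios.length
theorem aInner_lt (bios : List String) (i : Nat) (h : i < bios.length) :
    aInner bios i < bios.length := by
  fun_induction aInner bios i with
  | case1 i h1 hI ih => exact ih (by omega)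
  | case2 i h1 hI => exact h
  | case3 i h1 => exact h

-- the tag right after aInner's stop is not an 'I' tag
theorem aInner_stop (bios : List String) (i : Nat) :
    PySem.Str.pyGet? bios[aInner bios i + 1]! 0 ≠ some 'I' ∨ ¬ aInner bios i + 1 < bios.length := by
  fun_induction aInner bios i with
  | case1 i h1 hI ih => exact ih
  | case2 i h1 hI => exact Or.inl hI
  | case3 i h1 => exact Or.inr h1

-- skipping the 'I' tags consumed by aInner leaves B's state machine unchanged
theorem bGo_skip (bios : List String) (i : Nat) :
    ∀ spans sp, bGo bios (i+1) (spans, some sp) = bGo bios (aInner bios i + 1) (spans, some sp) := by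
  fun_induction aInner bios i with
  | case1 i h1 hI ih =>
    intro spans sp
    rw [bGo, dif_pos h1]
    have hstep : bStep (spans, some sp) ((↑(i+1) : Int), bios[i+1]!) = (spans, some sp) := by
      simp only [bStep]
      rw [hI]
      simp
    rw [hstep]
    exact ih spans sp
  | case2 i h1 hI => intro spans sp; rfl
  | case3 i h1 => intro spans sp; rfl

-- span count: the final span list has one span per remaining 'B' tag, plus the open one
theorem bFin_length (bios : List String) :
    ∀ (k i : Nat), bios.length - i ≤ k →
      ∀ st : List (Int × Int) × Option Int,
        (bFin bios (bGo bios i st)).length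
          = st.1.length + (if st.2.isSome then 1 else 0) + (bios.drop i).countP isB := by
  intro k
  induction k with
  | zero =>
    intro i hk st
    rw [bGo, dif_neg (by omega)]
    have : bios.drop i = [] := List.drop_eq_nil_of_le (by omega)
    cases hst : st.2 <;> simp [bFin, this, hst]
  | succ k ih =>
    intro i hk st
    by_cases h : i < bios.length
    · rw [bGo, dif_pos h]
      have hdrop : bios.drop i = bios[i] :: bios.drop (i+1) := List.drop_eq_getElem_cons h
      have hx : bios[i]! = bios[i] := getElem!_pos bios i h
      rw [ih (i+1) (by omega), hdrop, List.countP_cons]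
      simp only [bStep, hx, isB]
      by_cases hB : PySem.Str.pyGet? bios[i] 0 = some 'B'
      · simp only [hB]
        cases hst : st.2 <;> simp [hst, beq_iff_eq] <;> omega
      · have hB' : ¬ PySem.List.pyGet? bios[i].toList 0 = some 'B' := by simpa using hB
        by_cases hI : PySem.List.pyGet? bios[i].toList 0 = some 'I'
        · simp [hI, hB']
        · cases hst : st.2 <;> simp [hst, beq_iff_eq, hB, hB', hI] <;> omega
    · rw [bGo, dif_neg h]
      have : bios.drop i = [] := List.drop_eq_nil_of_le (by omega)
      cases hst : st.2 <;> simp [bFin, this, hst]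

-- bios[aInner bios i + 1] is never an 'I' tag (out of range gives the default "")
theorem aInner_stop' (bios : List String) (i : Nat) :
    PySem.Str.pyGet? bios[aInner bios i + 1]! 0 ≠ some 'I' := by
  rcases aInner_stop bios i with h | h
  · exact h
  · rw [getElem!_neg bios _ h]
    decide

-- MAIN INVARIANT: A's loop equals first/last selection from B's eventual span list
-- (V := spans ++ vtail start ↑i is the list of spans A has recorded so far).
theorem aLoop_eq (bios : List String) (i : Nat) (f : Bool) (s1 s2 : Int × Int) :
    ∀ (spans : List (Int × Int)) (start : Option Int),
      i ≤ bios.length →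
      (start.isSome → PySem.Str.pyGet? bios[i]! 0 ≠ some 'I') →
      f = !(spans ++ vtail start (i : Int)).isEmpty →
      s1 = (spans ++ vtail start (i : Int)).headD (0, 0) →
      s2 = (if 2 ≤ (spans ++ vtail start (i : Int)).length
            then (spans ++ vtail start (i : Int)).getLastD (0, 0) else (0, 0)) →
      aLoop bios i f s1 s2 =
        ((bFin bios (bGo bios i (spans, start))).headD (0, 0),
         if 2 ≤ (bFin bios (bGo bios i (spans, start))).length
         then (bFin bios (bGo bios i (spans, start))).getLastD (0, 0) else (0, 0)) := by
  fun_induction aLoop bios i f s1 s2 with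
  | case1 i s1 s2 h hB j ih =>
    intro spans start hle hguard hf0 hs1 hs2
    -- f = false: nothing recorded yet, so spans = [] and start = none
    have hV : spans ++ vtail start (i : Int) = [] := by
      cases hzz : (spans ++ vtail start (i : Int)).isEmpty
      · rw [hzz] at hf0; simp at hf0
      · exact List.isEmpty_iff.mp hzz
    have hsp : spans = [] := (List.append_eq_nil_iff.mp hV).1
    have hst : start = none := by
      cases start with
      | none => rfl
      | some sp => simp [vtail] at hV
    subst hsp hst
    rw [bGo, dif_pos h]
    have hstep : bStep (([] : List (Int × Int)), none) ((i : Int), bios[i]!) = ([], some (i : Int)) := by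
      simp only [bStep]; rw [hB]; simp
    rw [hstep, bGo_skip bios i]
    refine ih [] (some (i : Int)) (aInner_lt bios i h) (fun _ => aInner_stop' bios i)
      (by simp [vtail]) (by simp [vtail]) ?_
    have hs2' : s2 = (0, 0) := by simpa [vtail] using hs2
    simpa [vtail] using hs2'
  | case2 i f s1 s2 h hB j hf ih =>
    intro spans start hle hguard hf0 hs1 hs2
    have hftrue : f = true := by simpa using hf
    have hV : spans ++ vtail start (i : Int) ≠ [] := by
      intro hz
      rw [hz] at hf0; simp [hftrue] at hf0
    rw [bGo, dif_pos h]
    have hstep : bStep (spans, start) ((i : Int), bios[i]!)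
        = (spans ++ vtail start (i : Int), some (i : Int)) := by
      simp only [bStep]; rw [hB]
      cases start <;> simp [vtail]
    rw [hstep, bGo_skip bios i]
    refine ih (spans ++ vtail start (i : Int)) (some (i : Int)) (aInner_lt bios i h)
      (fun _ => aInner_stop' bios i) (by simp [vtail, hftrue]) ?_ ?_
    · rw [headD_append _ _ _ hV]
      exact hs1
    · have hlen : 2 ≤ ((spans ++ vtail start (i : Int)) ++ vtail (some (i : Int)) ((j + 1 : Nat) : Int)).length := by
        have h1 : 0 < (spans ++ vtail start (i : Int)).length := List.length_pos_iff.mpr hV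
        have h2 : (vtail (some (i : Int)) ((j + 1 : Nat) : Int)).length = 1 := rfl
        rw [List.length_append, h2]
        omega
      rw [if_pos hlen]
      rw [show vtail (some (i : Int)) ((j + 1 : Nat) : Int) = [((i : Int), ((j + 1 : Nat) : Int))] from rfl,
        List.getLastD_concat]
      push_cast
      rfl
  | case3 i f s1 s2 h hB ih =>
    intro spans start hle hguard hf0 hs1 hs2
    rw [bGo, dif_pos h]
    by_cases hI : PySem.Str.pyGet? bios[i]! 0 = some 'I'
    · have hst : start = none := by
        cases start with
        | none => rfl
        | some sp => exact absurd hI (hguard (by simp))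
      subst hst
      have hstep : bStep (spans, none) ((i : Int), bios[i]!) = (spans, none) := by
        simp only [bStep]; rw [hI]; simp
      rw [hstep]
      refine ih spans none (by omega) (by simp) ?_ ?_ ?_
      · simpa [vtail] using hf0
      · simpa [vtail] using hs1
      · simpa [vtail] using hs2
    · cases start with
      | none =>
        have hstep : bStep (spans, none) ((i : Int), bios[i]!) = (spans, none) := by
          simp only [bStep]; rw [if_neg hB, if_pos hI]
        rw [hstep]
        refine ih spans none (by omega) (by simp) ?_ ?_ ?_
        · simpa [vtail] using hf0
        · simpa [vtail] using hs1
        · simpa [vtail] using hs2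
      | some sp =>
        have hstep : bStep (spans, some sp) ((i : Int), bios[i]!)
            = (spans ++ [(sp, (i : Int))], none) := by
          simp only [bStep]; rw [if_neg hB, if_pos hI]
        rw [hstep]
        refine ih (spans ++ [(sp, (i : Int))]) none (by omega) (by simp) ?_ ?_ ?_
        · simpa [vtail] using hf0
        · simpa [vtail] using hs1
        · simpa [vtail] using hs2
  | case4 i f s1 s2 h =>
    intro spans start hle hguard hf0 hs1 hs2
    have hi : i = bios.length := by omega
    rw [bGo, dif_neg h]
    have hfin : bFin bios (spans, start) = spans ++ vtail start (i : Int) := by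
      cases start <;> simp [bFin, vtail, hi]
    rw [hfin, ← hs1, ← hs2]

-- ===== VERDICT (by name: the statement is the Claim_ definition above) =====
theorem get_entity_pos_of_relation_spec : Claim_equal_get_entity_pos_of_relation := by
  intro bios _ hpre
  unfold Spec_get_entity_pos_of_relation
  have hmain := aLoop_eq bios 0 false (0, 0) (0, 0) [] none (by omega)
    (by simp) (by simp [vtail]) (by simp [vtail]) (by simp [vtail])
  have hlen : (bFin bios (bGo bios 0 ([], none))).length = bios.countP isB := by
    have := bFin_length bios bios.length 0 (by omega) ([], none)
    simpa using this
  have h2 : 2 ≤ (bFin bios (bGo bios 0 ([], none))).length := by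
    rw [hlen]; exact hpre.2
  have hne : bFin bios (bGo bios 0 ([], none)) ≠ [] := by
    intro hz; rw [hz] at h2; simp at h2
  have hfold : (PySem.List.enumerate bios 0).foldl bStep ([], none) = bGo bios 0 ([], none) := by
    have := foldl_enum_eq_bGo bios [] ([], none)
    simpa using this
  show get_entity_pos_of_relation bios = get_entity_pos_of_relation_alt bios
  unfold get_entity_pos_of_relation get_entity_pos_of_relation_alt
  rw [hfold]
  have hspans : (match (bGo bios 0 ([], none)).2 with
      | some s => (bGo bios 0 ([], none)).1 ++ [(s, (bios.length : Int))]
      | none => (bGo bios 0 ([], none)).1) = bFin bios (bGo bios 0 ([], none)) := rfl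
  rw [hmain, if_pos h2]
  simp only [hspans]
  rw [PySem.List.pyGet?_zero, PySem.List.pyGet?_neg_one]
  cases hT : bFin bios (bGo bios 0 ([], none)) with
  | nil => exact absurd hT hne
  | cons x xs => simp [List.getLastD_eq_getLast?]
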